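-- pv_equiv track=rewrite | github.com/sreayas-me/bot | cogs/unique/old_economy.py | _parse_buy_args
-- ===== SOURCE A (Python) =====
-- def _parse_buy_args(args: str) -> list:
--     """Parse buy command arguments into [(item_id, amount), ...]"""
--     parts = args.split()
--     items = []
--
--     i = 0
--     while i < len(parts):
--         item_id = parts[i]
--         amount = 1
--
--         # Check if next part is a number
--         if i + 1 < len(parts) and parts[i + 1].isdigit():
--             amount = int(parts[i + 1])
--             i += 2
--         else:
--             i += 1
--
--         items.append((item_id, amount))
--
--     return items
-- ===== SOURCE B (Python) =====
-- def _parse_buy_args(args: str) -> list: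
--     """Parse buy command arguments into [(item_id, amount), ...]"""
--     items = []
--     can_consume = False
--     for tok in args.split():
--         if can_consume and tok.isdigit():
--             items[-1] = (items[-1][0], int(tok))
--             can_consume = False
--         else:
--             items.append((tok, 1))
--             can_consume = True
--     return items
-- ===== Notes on version B (the rewrite author's own statement) =====
-- stated objective: alternative
-- what changed: Replaced the index-based while loop with variable stride and lookahead (peek at parts[i+1], advance by 1 or 2) by a single for loop over the tokens with a lookback flag: a digit token directly following an unconsumed item overwrites the amount of the last appended pair.
import Mathlib
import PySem

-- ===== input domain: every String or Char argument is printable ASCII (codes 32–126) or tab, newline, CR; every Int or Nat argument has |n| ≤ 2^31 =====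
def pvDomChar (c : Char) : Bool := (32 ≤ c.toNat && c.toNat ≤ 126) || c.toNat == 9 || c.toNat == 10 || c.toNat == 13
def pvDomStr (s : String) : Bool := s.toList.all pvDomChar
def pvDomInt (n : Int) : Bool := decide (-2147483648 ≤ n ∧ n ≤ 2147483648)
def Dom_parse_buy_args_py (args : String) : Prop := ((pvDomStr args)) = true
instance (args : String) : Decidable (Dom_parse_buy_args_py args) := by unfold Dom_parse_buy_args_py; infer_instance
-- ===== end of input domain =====

-- B replaces A's lookahead/variable-stride index loop by a single token loop with a
-- lookback flag that lets a digit token overwrite the previous pair's amount (objective: alternative).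

-- ===== PORT A =====
-- A's while loop over parts: takes the current token, peeks at the next; if it is a
-- digit string it becomes the amount and the index advances by 2, else by 1.
def pvGoA : List String → List (String × Int)
  | [] => []
  | [t] => [(t, 1)]
  | t :: u :: rest =>
      if PySem.Str.strIsdigit u then
        (t, (PySem.Int.ofStr? u).getD 0) :: pvGoA rest
      else
        (t, 1) :: pvGoA (u :: rest)

def parse_buy_args_py (args : String) : List (String × Int) :=
  pvGoA (PySem.Str.split₀ args)

-- ===== PORT B =====
-- B's for loop: accumulator kept reversed; can = can_consume flag.
def pvGoB : List String → List (String × Int) → Bool → List (String × Int)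
  | [], acc, _ => acc.reverse
  | t :: rest, acc, can =>
      if can && PySem.Str.strIsdigit t then
        -- items[-1] = (items[-1][0], int(t)); can_consume = False
        match acc with
        | (id, _) :: tail => pvGoB rest ((id, (PySem.Int.ofStr? t).getD 0) :: tail) false
        | [] => pvGoB rest acc false  -- unreachable: can = true only after an append
      else
        pvGoB rest ((t, 1) :: acc) true

def parse_buy_args_py_alt (args : String) : List (String × Int) :=
  pvGoB (PySem.Str.split₀ args) [] false

-- ===== PRECONDITION & SPEC =====
def Spec_parse_buy_args_py (args : String) (out : List (String × Int)) : Prop := out = parse_buy_args_py_alt args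
instance (args : String) (out : List (String × Int)) : Decidable (Spec_parse_buy_args_py args out) := by unfold Spec_parse_buy_args_py; infer_instance

-- ===== CLAIM (what is proved, stated in full; the proofs are below) =====
def Claim_equal_parse_buy_args_py : Prop := ∀ (args : String), Dom_parse_buy_args_py args → Spec_parse_buy_args_py args (parse_buy_args_py args)

-- ===== LEMMAS AND PROOFS =====

-- Invariant linking B's flag/accumulator state to A's scan position:
-- with the flag cleared, B still has to produce pvGoA parts; with the flag set and a
-- freshly appended pair (id, 1) on top of the accumulator, B produces what A produces
-- from the item id with the remaining tokens.
theorem pvGoB_inv : ∀ (parts : List String),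
    (∀ acc, pvGoB parts acc false = acc.reverse ++ pvGoA parts) ∧
    (∀ acc id, pvGoB parts ((id, 1) :: acc) true = acc.reverse ++ pvGoA (id :: parts)) := by
  intro parts
  induction parts with
  | nil => exact ⟨fun acc => by simp [pvGoB, pvGoA], fun acc id => by simp [pvGoB, pvGoA]⟩
  | cons t rest ih =>
    refine ⟨fun acc => ?_, fun acc id => ?_⟩
    · show pvGoB rest ((t, 1) :: acc) true = _
      exact ih.2 acc t
    · by_cases h : PySem.Str.strIsdigit t = true
      · have h' : PySem.Chars.strIsdigit t.toList = true := by
          rw [← PySem.Str.strIsdigit_eq]; exact h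
        simp only [pvGoB, pvGoA, Bool.true_and, ih.1]
        simp [h']
      · have h' : PySem.Chars.strIsdigit t.toList = false := by
          rw [← PySem.Str.strIsdigit_eq]; exact Bool.not_eq_true _ ▸ h
        simp only [pvGoB, pvGoA, Bool.true_and, ih.2 ((id, 1) :: acc) t]
        simp [h']

-- ===== VERDICT (by name: the statement is the Claim_ definition above) =====
theorem parse_buy_args_py_spec : Claim_equal_parse_buy_args_py := by
  intro args _
  unfold Spec_parse_buy_args_py parse_buy_args_py parse_buy_args_py_alt
  rw [(pvGoB_inv (PySem.Str.split₀ args)).1 []]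
  simp
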